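-- pv_equiv track=rewrite | github.com/honey-lee/Algorithm---Programmers | Python - Level2/n^2 배열 자르기/n^2 배열 자르기.py | solution
-- ===== SOURCE A (Python) =====
-- def solution(n, left, right):
--     answer = []
--     cnt = 1
--     for i in range(n):
--         for j in range(1, n + 1):
--             if cnt <= j:
--                 answer.append(j)
--             else:
--                 answer.append(cnt)
--         cnt += 1
--
--     return answer[left:right + 1]
-- ===== SOURCE B (Python) =====
-- def solution(n, left, right):
--     size = max(n, 0) ** 2
--     start, stop, _ = slice(left, right + 1).indices(size)
--     return [max(k // n, k % n) + 1 for k in range(start, stop)]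
-- ===== Notes on version B (the rewrite author's own statement) =====
-- stated objective: faster
-- what changed: Instead of materialising the whole n*n table and slicing it, B resolves the slice bounds arithmetically (Python's slice.indices) and computes each requested element directly as max(k // n, k % n) + 1.
import Mathlib
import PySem

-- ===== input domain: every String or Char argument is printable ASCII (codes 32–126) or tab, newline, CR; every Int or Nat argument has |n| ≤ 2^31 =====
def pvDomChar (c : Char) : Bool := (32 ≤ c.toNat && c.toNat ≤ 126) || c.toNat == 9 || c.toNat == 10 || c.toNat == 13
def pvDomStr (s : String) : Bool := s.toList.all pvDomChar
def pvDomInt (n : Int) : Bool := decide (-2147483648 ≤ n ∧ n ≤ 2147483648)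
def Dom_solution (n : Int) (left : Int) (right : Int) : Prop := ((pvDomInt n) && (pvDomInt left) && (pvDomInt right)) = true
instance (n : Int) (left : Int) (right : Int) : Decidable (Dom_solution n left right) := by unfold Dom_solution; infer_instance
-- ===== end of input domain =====

-- B computes each sliced element directly by index arithmetic instead of building the n^2 table: O(right-left) vs O(n^2) (objective: faster).

-- ===== PORT A =====
def solution (n : Int) (left : Int) (right : Int) : List Int :=
  let st := (PySem.List.pyRange 0 n).foldl
      (fun (st : List Int × Int) _i =>
        ((PySem.List.pyRange 1 (n + 1)).foldl
          (fun acc j => acc ++ [if st.2 ≤ j then j else st.2]) st.1, st.2 + 1))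
      ([], 1)
  PySem.List.slice st.1 (some left) (some (right + 1))

-- ===== PORT B =====
-- port of Python's `slice(i, …).indices(size)` clamp for a step-1 slice bound
def pySliceClamp (i : Int) (size : Int) : Int := if i < 0 then max (size + i) 0 else min i size

def solution_alt (n : Int) (left : Int) (right : Int) : List Int :=
  let size : Int := (max n 0) ^ 2
  let start := pySliceClamp left size
  let stop := pySliceClamp (right + 1) size
  (PySem.List.pyRange start stop).map
    (fun k => max (PySem.Int.floordiv k n) (PySem.Int.mod k n) + 1)

-- ===== PRECONDITION & SPEC =====
def Spec_solution (n : Int) (left : Int) (right : Int) (out : List Int) : Prop := out = solution_alt n left right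
instance (n : Int) (left : Int) (right : Int) (out : List Int) : Decidable (Spec_solution n left right out) := by unfold Spec_solution; infer_instance

-- ===== CLAIM (what is proved, stated in full; the proofs are below) =====
def Claim_equal_solution : Prop := ∀ (n : Int) (left : Int) (right : Int), Dom_solution n left right → Spec_solution n left right (solution n left right)

-- ===== LEMMAS AND PROOFS =====

-- one row of A's table, for a fixed value of cnt
def rowF (n c : Int) : List Int :=
  (PySem.List.pyRange 1 (n + 1)).map (fun j => if c ≤ j then j else c)

theorem foldl_push (l : List Int) (acc : List Int) (h : Int → Int) :
    l.foldl (fun a j => a ++ [h j]) acc = acc ++ l.map h := by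
  induction l generalizing acc with
  | nil => simp
  | cons x xs ih => simp [List.foldl_cons, ih]

theorem outer_fold (n : Int) (l : List Int) (acc : List Int) (c : Int) :
    l.foldl
      (fun (st : List Int × Int) _i =>
        ((PySem.List.pyRange 1 (n + 1)).foldl
          (fun a j => a ++ [if st.2 ≤ j then j else st.2]) st.1, st.2 + 1)) (acc, c)
    = (acc ++ (List.range l.length).flatMap (fun t : Nat => rowF n (c + (t : Int))), c + l.length) := by
  induction l generalizing acc c with
  | nil => simp
  | cons x xs ih =>
      rw [List.foldl_cons, foldl_push, ih]
      simp only [Prod.mk.injEq]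
      refine ⟨?_, by simp [List.length_cons]; ring⟩
      show acc ++ rowF n c ++ _ = _
      rw [List.append_assoc]
      congr 1
      have hlen : xs.length + 1 = 1 + xs.length := by omega
      rw [List.length_cons, hlen, List.range_add, List.flatMap_append, List.flatMap_map]
      simp only [List.range_one, List.flatMap_cons, List.flatMap_nil, List.append_nil,
        Nat.cast_zero, add_zero]
      have hf : ∀ t : Nat, c + 1 + (t : Int) = c + ((1 + t : Nat) : Int) := by
        intro t; push_cast; ring
      simp only [hf]

theorem flatten_range (a b : Nat) (g : Nat → Int) :
    (List.range a).flatMap (fun i => (List.range b).map (fun j => g (i * b + j)))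
      = (List.range (a * b)).map g := by
  induction a with
  | zero => simp
  | succ a ih =>
      rw [List.range_succ, List.flatMap_append, ih]
      have : (a + 1) * b = a * b + b := by ring
      rw [this, List.range_add, List.map_append, List.map_map]
      simp [Function.comp]

theorem row_closed (m i : Nat) (hm : 0 < m) :
    rowF (m : Int) (1 + (i : Int))
      = (List.range m).map
          (fun j => max (PySem.Int.floordiv ((i * m + j : Nat) : Int) (m : Int))
                        (PySem.Int.mod ((i * m + j : Nat) : Int) (m : Int)) + 1) := by
  unfold rowF
  rw [PySem.List.pyRange_one]
  have h1 : ((m : Int) + 1 - 1).toNat = m := by omega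
  rw [h1, List.map_map]
  apply List.map_congr_left
  intro j hj
  have hjm : j < m := List.mem_range.mp hj
  have hd : (i * m + j) / m = i := by
    rw [Nat.add_comm, Nat.mul_comm, Nat.add_mul_div_left _ _ hm, Nat.div_eq_of_lt hjm]; omega
  have hmod : (i * m + j) % m = j := by
    rw [Nat.add_comm, Nat.mul_comm, Nat.add_mul_mod_self_left, Nat.mod_eq_of_lt hjm]
  simp only [Function.comp_apply, PySem.Int.floordiv_natCast, PySem.Int.mod_natCast, hd, hmod]
  split_ifs <;> omega

theorem drop_take_range_map (g : Nat → Int) (L sa c : Nat) (h : sa + c ≤ L) :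
    (((List.range L).map g).drop sa).take c = (List.range c).map (fun k => g (sa + k)) := by
  apply List.ext_getElem
  · simp; omega
  · intro t h1 h2
    simp only [List.getElem_take, List.getElem_drop, List.getElem_map, List.getElem_range]

theorem clampIdx_cast (L : Nat) (i : Int) :
    (PySem.List.clampIdx L i : Int) = pySliceClamp i (L : Int) := by
  simp only [PySem.List.clampIdx, pySliceClamp]
  split_ifs <;> omega

theorem slice_map_range (h : Int → Int) (L : Nat) (a b : Int) :
    PySem.List.slice ((List.range L).map (fun k : Nat => h (k : Int))) (some a) (some b)
      = (PySem.List.pyRange (pySliceClamp a (L : Int)) (pySliceClamp b (L : Int))).map h := by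
  rw [← clampIdx_cast, ← clampIdx_cast, PySem.List.pyRange_one]
  set sa := PySem.List.clampIdx L a with hsa
  set sb := PySem.List.clampIdx L b with hsb
  have hL : sb ≤ L := PySem.List.clampIdx_le L b
  have h2 : ((sb : Int) - (sa : Int)).toNat = sb - sa := by omega
  rw [h2]
  simp only [PySem.List.slice, List.length_map, List.length_range]
  by_cases hle : sa ≤ sb
  · rw [drop_take_range_map _ _ _ _ (by omega), List.map_map]
    apply List.map_congr_left
    intro k _
    simp only [Function.comp_apply]
    congr 1
  · have h0 : sb - sa = 0 := by omega
    simp [h0]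
    omega

theorem answer_eq (n : Int) :
    ((PySem.List.pyRange 0 n).foldl
      (fun (st : List Int × Int) _i =>
        ((PySem.List.pyRange 1 (n + 1)).foldl
          (fun a j => a ++ [if st.2 ≤ j then j else st.2]) st.1, st.2 + 1))
      ([], 1)).1
    = (List.range ((max n 0).toNat * (max n 0).toNat)).map
        (fun k : Nat => max (PySem.Int.floordiv (k : Int) n) (PySem.Int.mod (k : Int) n) + 1) := by
  rw [outer_fold]
  by_cases hn : 0 < n
  · set m := n.toNat with hmdef
    have hmn : ((m : Int)) = n := by omega
    have hmax : (max n 0).toNat = m := by omega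
    have hlen : (PySem.List.pyRange 0 n).length = m := by
      rw [PySem.List.pyRange_one]; simp; omega
    rw [hmax, hlen]
    simp only [List.nil_append]
    rw [← hmn]
    rw [← flatten_range m m
      (fun k : Nat => max (PySem.Int.floordiv (k : Int) (m : Int)) (PySem.Int.mod (k : Int) (m : Int)) + 1)]
    apply List.flatMap_congr
    intro i hi
    exact row_closed m i (by omega)
  · have h0 : PySem.List.pyRange 0 n = [] := by
      rw [PySem.List.pyRange_one]; simp; omega
    have hmax : (max n 0).toNat = 0 := by omega
    simp [h0, hmax]

-- ===== VERDICT (by name: the statement is the Claim_ definition above) =====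
theorem solution_spec : Claim_equal_solution := by
  intro n left right _
  show solution n left right = solution_alt n left right
  simp only [solution, solution_alt]
  rw [answer_eq n,
    slice_map_range (fun k => max (PySem.Int.floordiv k n) (PySem.Int.mod k n) + 1)
      ((max n 0).toNat * (max n 0).toNat) left (right + 1)]
  have h1 : ((max n 0).toNat : Int) = max n 0 := Int.toNat_of_nonneg (le_max_right n 0)
  have hsize : (((max n 0).toNat * (max n 0).toNat : Nat) : Int) = (max n 0) ^ 2 := by
    push_cast [h1]; ring
  rw [hsize]
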